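-- pv_equiv track=rewrite | github.com/cnacc23/projects | A3Q1.py | tally_genotypes
-- ===== SOURCE A (Python) =====
-- def tally_genotypes(snp_list):
--     g0, g1, g2= 0, 0, 0
--
--     for i in range(len(snp_list)):
--
--        #homozygous cases
--         if snp_list[i][0] == snp_list[i][1]:
--
--             #homozygous for ref allele (0|0)
--             if snp_list[i][0] == '0':
--                 g0 += 1
--
--             #homozygous for alt allele (1|1)
--             elif snp_list[i][0] == '1':
--                 g2 += 1
--
--         #heterozygous case (0|1 or 1|0)
--         else:
--             g1 += 1
--
--     return[g0, g1, g2]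
-- ===== SOURCE B (Python) =====
-- def tally_genotypes(snp_list):
--     g0 = snp_list.count(('0', '0'))
--     g2 = snp_list.count(('1', '1'))
--     g1 = sum(1 for s in snp_list if s[0] != s[1])
--     return [g0, g1, g2]
-- ===== Notes on version B (the rewrite author's own statement) =====
-- stated objective: idiomatic
-- what changed: Replaces A's single indexed loop with per-element if/elif branching by three counting aggregations: list.count of the two homozygous pairs and a 0/1-sum over unequal pairs.
import Mathlib
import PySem

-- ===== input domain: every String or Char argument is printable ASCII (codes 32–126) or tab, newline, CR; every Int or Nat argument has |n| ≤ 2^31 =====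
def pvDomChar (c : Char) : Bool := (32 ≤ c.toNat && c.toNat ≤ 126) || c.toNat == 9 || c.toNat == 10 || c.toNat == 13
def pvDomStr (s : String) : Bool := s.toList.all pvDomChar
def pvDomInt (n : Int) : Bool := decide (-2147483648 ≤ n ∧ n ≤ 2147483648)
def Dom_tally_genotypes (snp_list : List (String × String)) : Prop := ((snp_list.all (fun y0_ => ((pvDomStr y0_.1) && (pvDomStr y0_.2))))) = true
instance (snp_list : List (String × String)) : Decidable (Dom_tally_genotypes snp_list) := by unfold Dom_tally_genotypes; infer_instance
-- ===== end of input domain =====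

-- ===== PORT A =====
-- A: single loop over the elements, branching per element, accumulating (g0, g1, g2).
def tallyStep (g : Int × Int × Int) (s : String × String) : Int × Int × Int :=
  if s.1 == s.2 then
    if s.1 == "0" then (g.1 + 1, g.2.1, g.2.2)
    else if s.1 == "1" then (g.1, g.2.1, g.2.2 + 1)
    else g
  else (g.1, g.2.1 + 1, g.2.2)

def tally_genotypes (snp_list : List (String × String)) : List Int :=
  let st : Int × Int × Int := snp_list.foldl tallyStep (0, 0, 0)
  [st.1, st.2.1, st.2.2]

-- ===== PORT B =====
-- B: three counting aggregations (list.count twice, a 0/1 sum over unequal pairs).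
def tally_genotypes_alt (snp_list : List (String × String)) : List Int :=
  let g0 : Int := PySem.List.count snp_list ("0", "0")
  let g2 : Int := PySem.List.count snp_list ("1", "1")
  let g1 : Int := snp_list.foldl (fun acc s => if s.1 != s.2 then acc + 1 else acc) 0
  [g0, g1, g2]

-- ===== PRECONDITION & SPEC =====
def Spec_tally_genotypes (snp_list : List (String × String)) (out : List Int) : Prop := out = tally_genotypes_alt snp_list
instance (snp_list : List (String × String)) (out : List Int) : Decidable (Spec_tally_genotypes snp_list out) := by unfold Spec_tally_genotypes; infer_instance

-- ===== CLAIM (what is proved, stated in full; the proofs are below) =====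
def Claim_equal_tally_genotypes : Prop := ∀ (snp_list : List (String × String)), Dom_tally_genotypes snp_list → Spec_tally_genotypes snp_list (tally_genotypes snp_list)

-- ===== LEMMAS AND PROOFS =====

-- ===== VERDICT (by name: the statement is the Claim_ definition above) =====
lemma tally_fold (l : List (String × String)) (a b c : Int) :
    l.foldl tallyStep (a, b, c)
    = (a + (l.count ("0", "0") : Int),
       b + (l.countP (fun s => s.1 != s.2) : Int),
       c + (l.count ("1", "1") : Int)) := by
  induction l generalizing a b c with
  | nil => simp
  | cons hd t ih =>
    obtain ⟨x, y⟩ := hd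
    rw [List.foldl_cons]
    by_cases hxy : x = y
    · subst hxy
      by_cases h0 : x = "0"
      · subst h0
        have hstep : tallyStep (a, b, c) ("0", "0") = (a + 1, b, c) := by
          simp [tallyStep]
        rw [hstep, ih]
        simp [Prod.ext_iff]
        ring
      · by_cases h1 : x = "1"
        · subst h1
          have hstep : tallyStep (a, b, c) ("1", "1") = (a, b, c + 1) := by
            simp [tallyStep]
          rw [hstep, ih]
          simp [Prod.ext_iff]
          ring
        · have hstep : tallyStep (a, b, c) (x, x) = (a, b, c) := by
            simp [tallyStep, h0, h1]
          have c0 : ¬ ((x, x) = (("0" : String), ("0" : String))) := by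
            simp [Prod.ext_iff]; intro h; exact absurd h h0
          have c1 : ¬ ((x, x) = (("1" : String), ("1" : String))) := by
            simp [Prod.ext_iff]; intro h; exact absurd h h1
          rw [hstep, ih]
          simp [c0, c1]
    · have hstep : tallyStep (a, b, c) (x, y) = (a, b + 1, c) := by
        simp [tallyStep, hxy]
      have c0 : ¬ ((x, y) = (("0" : String), ("0" : String))) := by
        simp [Prod.ext_iff]; intro h h'; exact hxy (h.trans h'.symm)
      have c1 : ¬ ((x, y) = (("1" : String), ("1" : String))) := by
        simp [Prod.ext_iff]; intro h h'; exact hxy (h.trans h'.symm)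
      rw [hstep, ih]
      simp [Prod.ext_iff, c0, c1, hxy]
      ring

theorem tally_genotypes_spec : Claim_equal_tally_genotypes := by
  intro l _
  unfold Spec_tally_genotypes tally_genotypes tally_genotypes_alt
  simp only [tally_fold, PySem.List.count_eq, PySem.List.foldl_if_add_one]
  simp
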